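-- pv_equiv track=rewrite | github.com/stevewyl/nlp_toolkit | nlp_toolkit/chunk_segmentor/utils.py | split_sublist
-- ===== SOURCE A (Python) =====
-- def split_sublist(list1, list2):
--     if len(list1) == 1:
--         return [list2]
--     else:
--         list1_len = [len(item) for item in list1]
--         new_list = []
--         for i in range(len(list1)):
--             if i == 0:
--                 start = 0
--             end = sum(list1_len[:i+1])
--             new_list.append(list2[start: end])
--             start = end
--         return new_list
-- ===== SOURCE B (Python) =====
-- def split_sublist(list1, list2):
--     if len(list1) == 1:
--         return [list2]
--
--     def go(ls, rest):
--         if not ls: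
--             return []
--         k = len(ls[0])
--         return [rest[:k]] + go(ls[1:], rest[k:])
--
--     return go(list1, list2)
-- ===== Notes on version B (the rewrite author's own statement) =====
-- stated objective: alternative
-- what changed: B keeps A's single-sublist branch but replaces A's indexed loop, which re-sums a prefix of a length list at every iteration, with a recursion that peels the head chunk off the remaining suffix of list2 (take/drop) at each step, maintaining no offsets or prefix sums; repeated suffix copies make it cost more in Python, not less.
import Mathlib
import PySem

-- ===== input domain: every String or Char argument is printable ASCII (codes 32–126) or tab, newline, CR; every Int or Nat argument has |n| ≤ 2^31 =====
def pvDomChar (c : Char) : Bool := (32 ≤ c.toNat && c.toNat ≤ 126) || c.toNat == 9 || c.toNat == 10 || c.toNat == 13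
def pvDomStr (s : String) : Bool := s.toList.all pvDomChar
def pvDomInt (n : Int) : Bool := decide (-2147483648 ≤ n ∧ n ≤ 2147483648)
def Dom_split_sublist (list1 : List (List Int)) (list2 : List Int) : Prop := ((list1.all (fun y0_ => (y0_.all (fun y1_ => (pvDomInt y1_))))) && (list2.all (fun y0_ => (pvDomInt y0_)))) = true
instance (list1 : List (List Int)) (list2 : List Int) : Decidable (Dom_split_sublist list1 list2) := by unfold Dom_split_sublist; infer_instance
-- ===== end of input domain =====

-- B keeps A's single-sublist branch but replaces A's indexed prefix-sum loop with a recursion that peels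
-- the head chunk off the remaining suffix of list2 at each step (no offsets, no prefix sums).

-- ===== PORT A =====
def split_sublist (list1 : List (List Int)) (list2 : List Int) : List (List Int) :=
  if list1.length == 1 then
    [list2]
  else
    let list1_len : List Int := list1.map (fun item => (item.length : Int))
    let r := (List.range list1.length).foldl
      (fun (st : List (List Int) × Int) i =>
        let start : Int := if i == 0 then 0 else st.2
        let e : Int := (list1_len.take (i+1)).sum
        (st.1 ++ [PySem.List.slice list2 (some start) (some e)], e))
      ([], 0)
    r.1

-- ===== PORT B =====
-- helper go(ls, rest): head chunk is rest[:len(ls[0])], recurse on rest[len(ls[0]):]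
def pvGo (ls : List (List Int)) (rest : List Int) : List (List Int) :=
  match ls with
  | [] => []
  | hd :: tl =>
      let k : Int := (hd.length : Int)
      PySem.List.slice rest none (some k) :: pvGo tl (PySem.List.slice rest (some k) none)

def split_sublist_alt (list1 : List (List Int)) (list2 : List Int) : List (List Int) :=
  if list1.length == 1 then
    [list2]
  else
    pvGo list1 list2

-- ===== PRECONDITION & SPEC =====
def Spec_split_sublist (list1 : List (List Int)) (list2 : List Int) (out : List (List Int)) : Prop := out = split_sublist_alt list1 list2
instance (list1 : List (List Int)) (list2 : List Int) (out : List (List Int)) : Decidable (Spec_split_sublist list1 list2 out) := by unfold Spec_split_sublist; infer_instance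

-- ===== CLAIM (what is proved, stated in full; the proofs are below) =====
def Claim_equal_split_sublist : Prop := ∀ (list1 : List (List Int)) (list2 : List Int), Dom_split_sublist list1 list2 → Spec_split_sublist list1 list2 (split_sublist list1 list2)

-- ===== LEMMAS AND PROOFS =====

/-- Intermediate characterisation of A: slice list2 at running nat offsets given by the sublist lengths. -/
def pvChunks (list2 : List Int) : List (List Int) → Nat → List (List Int)
  | [], _ => []
  | it :: rest, s =>
      PySem.List.slice list2 (some (s : Int)) (some ((s : Int) + (it.length : Int))) :: pvChunks list2 rest (s + it.length)

lemma A_fold (list2 : List Int) (len : List Int) (n : Nat) :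
    (List.range n).foldl
      (fun (st : List (List Int) × Int) i =>
        let start : Int := if i == 0 then 0 else st.2
        let e : Int := (len.take (i+1)).sum
        (st.1 ++ [PySem.List.slice list2 (some start) (some e)], e))
      ([], 0)
    = ((List.range n).map (fun i =>
        PySem.List.slice list2 (some ((len.take i).sum)) (some ((len.take (i+1)).sum))),
       (len.take n).sum) := by
  induction n with
  | zero => simp
  | succ n ih =>
      rw [List.range_succ, List.foldl_append, ih]
      simp only [List.foldl_cons, List.foldl_nil, List.map_append, List.map_cons, List.map_nil]
      rcases Nat.eq_zero_or_pos n with h | h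
      · subst h; simp
      · have : (n == 0) = false := by simp; omega
        simp [this]

lemma map_pre_eq_chunks (list2 : List Int) (l : List (List Int)) (s : Nat) :
    (List.range l.length).map (fun i =>
        PySem.List.slice list2
          (some ((s : Int) + (((l.map (fun it => (it.length : Int))).take i).sum)))
          (some ((s : Int) + (((l.map (fun it => (it.length : Int))).take (i+1)).sum))))
    = pvChunks list2 l s := by
  induction l generalizing s with
  | nil => simp [pvChunks]
  | cons it rest ih =>
      have hs : ((s : Int) + (it.length : Int)) = (((s + it.length : Nat)) : Int) := by
        push_cast; ring
      simp only [List.length_cons, List.range_succ_eq_map, List.map_cons, List.map_map, pvChunks]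
      refine congrArg₂ List.cons ?_ ?_
      · simp
      · rw [← ih (s + it.length)]
        apply List.map_congr_left
        intro i _
        simp only [Function.comp_apply, Nat.succ_eq_add_one, List.take_succ_cons,
          List.sum_cons, ← add_assoc, hs]

lemma A_eq_chunks_of_ne_one (list1 : List (List Int)) (list2 : List Int)
    (h : list1.length ≠ 1) : split_sublist list1 list2 = pvChunks list2 list1 0 := by
  unfold split_sublist
  have hb : (list1.length == 1) = false := by simpa using h
  rw [hb]
  simp only [Bool.false_eq_true, if_false]
  rw [A_fold]
  have := map_pre_eq_chunks list2 list1 0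
  simp only [Nat.cast_zero, zero_add] at this
  simpa using this

lemma go_eq_chunks (list2 : List Int) (l : List (List Int)) (s : Nat) :
    pvGo l (list2.drop s) = pvChunks list2 l s := by
  induction l generalizing s with
  | nil => simp [pvGo, pvChunks]
  | cons it rest ih =>
      simp only [pvGo, pvChunks]
      refine congrArg₂ List.cons ?_ ?_
      · rw [PySem.List.slice_to_natCast, PySem.List.slice_natCast_add]
      · rw [PySem.List.slice_from_natCast, List.drop_drop, Nat.add_comm, ih]

-- ===== VERDICT (by name: the statement is the Claim_ definition above) =====
theorem split_sublist_spec : Claim_equal_split_sublist := by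
  intro list1 list2 _
  unfold Spec_split_sublist split_sublist_alt
  by_cases h1 : list1.length = 1
  · unfold split_sublist
    simp [h1]
  · have hb : (list1.length == 1) = false := by simpa using h1
    rw [hb]
    simp only [Bool.false_eq_true, if_false]
    have hB := go_eq_chunks list2 list1 0
    simp only [List.drop_zero] at hB
    rw [A_eq_chunks_of_ne_one list1 list2 h1, ← hB]
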